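-- pv_equiv track=rewrite | github.com/andirsun/Binary-Search | serverLoad.py | solution
-- ===== SOURCE A (Python) =====
-- def loadToFirst(server1,server2,number):
--     server1.append(number)
--     return abs(sum(server2)-sum(server1))
--
-- def loadToSecond(server1,server2,number):
--     server2.append(number)
--     return abs(sum(server2)-sum(server1))
--
-- def solution(A):
--     server1 = []
--     server2 = []
--     server1.append(A[0])
--     server1.append(A[1])
--     for i in A[2:len(A)]:
--         load1 = sum(server1)
--         load2 = sum(server2)
--         if(loadToFirst(server1,server2,i)<=loadToSecond(server1,server2,i)):
--             server1.append(i)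
--         else:
--             server2.append(i)
--     return abs(sum(server2)-sum(server1))
-- ===== SOURCE B (Python) =====
-- def solution(A):
--     # A's double-append greedy collapses to a recurrence on the signed
--     # difference e = sum(server1) - sum(server2): each later element x is
--     # ADDED to e exactly when x lies in the closed interval between 0 and
--     # -2*e (A's trial placements make its test equivalent to |e+x| <= |e|),
--     # otherwise subtracted; the answer is |e|.  One pass, no lists, no
--     # re-summing, no trial appends.
--     e = A[0] + A[1]
--     for x in A[2:]:
--         lo, hi = min(0, -2 * e), max(0, -2 * e)
--         e = e + x if lo <= x <= hi else e - x
--     return abs(e)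
-- ===== Notes on version B (the rewrite author's own statement) =====
-- stated objective: faster
-- what changed: Replaces A's two simulated server lists with trial appends and full re-summing each step by a single pass on the signed difference e = server1 - server2, deciding each element by membership in the closed interval between 0 and -2*e (no absolute values or trial placements inside the loop).
import Mathlib
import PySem

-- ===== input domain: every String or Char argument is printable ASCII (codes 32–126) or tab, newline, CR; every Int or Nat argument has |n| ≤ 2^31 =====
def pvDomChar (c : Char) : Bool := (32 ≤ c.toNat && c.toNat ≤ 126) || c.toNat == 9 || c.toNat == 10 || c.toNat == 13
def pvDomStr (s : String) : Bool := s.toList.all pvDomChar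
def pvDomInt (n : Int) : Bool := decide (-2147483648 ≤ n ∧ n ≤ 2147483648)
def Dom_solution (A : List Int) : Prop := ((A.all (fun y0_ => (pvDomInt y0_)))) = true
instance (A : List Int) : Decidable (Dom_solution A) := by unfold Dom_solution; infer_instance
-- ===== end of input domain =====

-- B replaces A's simulated server lists (trial appends + full re-summing each
-- step, O(n^2)) by one pass on the signed difference e = server1 - server2,
-- deciding each element by membership in the interval between 0 and -2*e.

-- ===== PORT A =====
-- loadToFirst/loadToSecond mutate a server list and return the new |difference|.
def loadToFirst (server1 server2 : List Int) (number : Int) : List Int × Int :=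
  let server1 := server1 ++ [number]
  (server1, |server2.sum - server1.sum|)

def loadToSecond (server1 server2 : List Int) (number : Int) : List Int × Int :=
  let server2 := server2 ++ [number]
  (server2, |server2.sum - server1.sum|)

def solutionStep (st : List Int × List Int) (i : Int) : List Int × List Int :=
  let server1 := st.1
  let server2 := st.2
  -- load1 / load2 are computed but never used in A
  let r1 := loadToFirst server1 server2 i
  let server1 := r1.1
  let r2 := loadToSecond server1 server2 i
  let server2 := r2.1
  if r1.2 ≤ r2.2 then (server1 ++ [i], server2) else (server1, server2 ++ [i])

def solution (A : List Int) : Int :=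
  match A with
  | a0 :: a1 :: rest =>
    let st := rest.foldl solutionStep ([a0, a1], [])
    |st.2.sum - st.1.sum|
  | _ => 0   -- Python raises IndexError here; excluded by Pre_solution

-- ===== PORT B =====
def solutionAltStep (e x : Int) : Int :=
  let lo := min 0 (-(2 * e))
  let hi := max 0 (-(2 * e))
  if lo ≤ x ∧ x ≤ hi then e + x else e - x

def solution_alt (A : List Int) : Int :=
  match A with
  | a0 :: tail =>
    match tail with
    | a1 :: rest => |rest.foldl solutionAltStep (a0 + a1)|
    | [] => 0   -- Source B raises IndexError here; excluded by Pre_solution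
  | [] => 0   -- likewise

-- ===== PRECONDITION & SPEC =====
-- Both Pythons raise IndexError when len(A) < 2.
def Pre_solution (A : List Int) : Prop := 2 ≤ A.length
instance (A : List Int) : Decidable (Pre_solution A) := by unfold Pre_solution; infer_instance
def pvWitness_solution : List Int := [3, -1, 4, 1]

def Spec_solution (A : List Int) (out : Int) : Prop := out = solution_alt A
instance (A : List Int) (out : Int) : Decidable (Spec_solution A out) := by unfold Spec_solution; infer_instance

-- ===== CLAIM (what is proved, stated in full; the proofs are below) =====
def Claim_equal_solution : Prop := ∀ (A : List Int), Dom_solution A → Pre_solution A → Spec_solution A (solution A)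

-- ===== LEMMAS AND PROOFS =====
-- B's interval test equals A's comparison of the two trial differences.
theorem cond_iff (e x : Int) :
    (min 0 (-(2 * e)) ≤ x ∧ x ≤ max 0 (-(2 * e))) ↔ |e + x| ≤ |e| := by
  rw [abs_le]
  rcases abs_cases e with ⟨h1, h2⟩ | ⟨h1, h2⟩ <;> rw [h1] <;>
    simp only [min_def, max_def] <;> split_ifs <;> omega

-- Invariant: A's fold keeps sum(server2) - sum(server1) equal to minus B's fold.
theorem fold_diff (rest : List Int) : ∀ (s1 s2 : List Int),
    (rest.foldl solutionStep (s1, s2)).2.sum - (rest.foldl solutionStep (s1, s2)).1.sum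
      = -(rest.foldl solutionAltStep (s1.sum - s2.sum)) := by
  induction rest with
  | nil => intro s1 s2; simp only [List.foldl_nil]; omega
  | cons x xs ih =>
    intro s1 s2
    simp only [List.foldl_cons]
    have hstep : solutionStep (s1, s2) x =
        if |s2.sum - s1.sum - x| ≤ |s2.sum - s1.sum| then (s1 ++ [x, x], s2 ++ [x])
        else (s1 ++ [x], s2 ++ [x, x]) := by
      simp only [solutionStep, loadToFirst, loadToSecond, List.sum_append]
      have h1 : s2.sum - (s1.sum + ([x] : List Int).sum) = s2.sum - s1.sum - x := by
        simp; ring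
      have h2 : s2.sum + ([x] : List Int).sum - (s1.sum + ([x] : List Int).sum)
          = s2.sum - s1.sum := by ring
      rw [h1, h2]
      split_ifs <;> simp [List.append_assoc]
    have hcond : (min 0 (-(2 * (s1.sum - s2.sum))) ≤ x ∧ x ≤ max 0 (-(2 * (s1.sum - s2.sum))))
        ↔ |s2.sum - s1.sum - x| ≤ |s2.sum - s1.sum| := by
      rw [cond_iff,
        show s1.sum - s2.sum + x = -(s2.sum - s1.sum - x) by ring, abs_neg,
        show s1.sum - s2.sum = -(s2.sum - s1.sum) by ring, abs_neg]
    rw [hstep, solutionAltStep]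
    split_ifs with hA hB hB
    · rw [ih]; congr 1; congr 1; simp [List.sum_append]; ring
    · exact absurd (hcond.mpr hA) hB
    · exact absurd (hcond.mp hB) hA
    · rw [ih]; congr 1; congr 1; simp [List.sum_append]; ring

theorem solution_eq_alt (A : List Int) : Pre_solution A → solution A = solution_alt A := by
  intro _
  match A with
  | a0 :: a1 :: rest =>
    simp only [solution, solution_alt]
    rw [fold_diff]
    simp [abs_neg]
  | [] => rfl
  | [_] => rfl

-- ===== VERDICT (by name: the statement is the Claim_ definition above) =====
theorem solution_spec : Claim_equal_solution := by
  intro A _ hpre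
  exact solution_eq_alt A hpre
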